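-- pv_equiv track=rewrite | github.com/allvegetable/skill-quarantine | skill_audit/sandbox.py | _find_honeypot_hits
-- ===== SOURCE A (Python) =====
-- from typing import Dict, List
--
-- def _find_honeypot_hits(accesses: List[str], honeypot_meta: Dict[str, object]) -> List[str]:
--     hit_list: List[str] = []
--     honeypot_files = honeypot_meta.get("files", {})
--     if not isinstance(honeypot_files, dict):
--         return hit_list
--
--     relevant_markers = [
--         "/home/auditor/.ssh/id_rsa",
--         "/home/auditor/.ssh/known_hosts",
--         "/home/auditor/.config/openclaw/config.json",
--         "/home/auditor/.aws/credentials",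
--         "/home/auditor/.env",
--     ]
--
--     dynamic_markers = [str(path) for path in honeypot_files.values()]
--     all_markers = relevant_markers + dynamic_markers
--
--     for accessed in accesses:
--         for marker in all_markers:
--             if marker in accessed:
--                 hit_list.append(accessed)
--                 break
--     return hit_list
-- ===== SOURCE B (Python) =====
-- from typing import Dict, List
--
-- def _find_honeypot_hits(accesses: List[str], honeypot_meta: Dict[str, object]) -> List[str]:
--     honeypot_files = honeypot_meta.get("files", {})
--     if not isinstance(honeypot_files, dict):
--         return []
--     markers = [
--         "/home/auditor/.ssh/id_rsa",
--         "/home/auditor/.ssh/known_hosts",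
--         "/home/auditor/.config/openclaw/config.json",
--         "/home/auditor/.aws/credentials",
--         "/home/auditor/.env",
--     ] + [str(path) for path in honeypot_files.values()]
--     hit_idx = set()
--     for marker in markers:
--         for i, accessed in enumerate(accesses):
--             if marker in accessed:
--                 hit_idx.add(i)
--     return [accessed for i, accessed in enumerate(accesses) if i in hit_idx]
-- ===== Notes on version B (the rewrite author's own statement) =====
-- stated objective: alternative
-- what changed: B inverts the traversal: instead of A's access-major loop with an inner marker scan and a break, B does a marker-major sweep that collects the set of hit access indices, then emits the matching accesses in one final ordered pass.
import Mathlib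
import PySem

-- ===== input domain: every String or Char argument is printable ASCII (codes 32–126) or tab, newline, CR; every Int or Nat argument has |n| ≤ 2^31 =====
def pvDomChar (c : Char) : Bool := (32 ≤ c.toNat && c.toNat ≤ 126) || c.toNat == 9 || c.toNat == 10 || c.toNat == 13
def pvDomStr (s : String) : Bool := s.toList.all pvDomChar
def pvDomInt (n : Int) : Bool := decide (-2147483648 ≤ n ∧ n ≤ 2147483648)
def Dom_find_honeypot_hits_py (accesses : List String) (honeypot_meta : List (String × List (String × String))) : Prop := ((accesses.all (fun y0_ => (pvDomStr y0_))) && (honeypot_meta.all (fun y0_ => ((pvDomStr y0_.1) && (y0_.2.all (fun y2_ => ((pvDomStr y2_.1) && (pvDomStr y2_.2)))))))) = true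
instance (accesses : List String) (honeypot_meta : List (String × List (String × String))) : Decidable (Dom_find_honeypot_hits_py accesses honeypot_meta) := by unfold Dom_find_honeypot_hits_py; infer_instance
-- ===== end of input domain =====

-- ===== PORT A =====
-- B inverts A's traversal (marker-major index-set sweep instead of access-major scan with break); same results, similar cost.
-- Inner `for marker in all_markers: if marker in accessed: append; break` of A:
def pvScanA (markers : List String) (accessed : String) : Bool :=
  match markers with
  | [] => false
  | m :: rest => if PySem.Str.isIn m accessed then true else pvScanA rest accessed

def pvStaticMarkers : List String :=
  [ "/home/auditor/.ssh/id_rsa"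
  , "/home/auditor/.ssh/known_hosts"
  , "/home/auditor/.config/openclaw/config.json"
  , "/home/auditor/.aws/credentials"
  , "/home/auditor/.env" ]

def find_honeypot_hits_py (accesses : List String) (honeypot_meta : List (String × List (String × String))) : List String :=
  -- honeypot_meta.get("files", {}): under the type convention the value is always a dict,
  -- so the `isinstance` guard of A never fires.
  let honeypot_files : PySem.Dict String String :=
    PySem.Dict.mk (PySem.Dict.getD (PySem.Dict.mk honeypot_meta) "files" [])
  -- str(path) on a string is the identity
  let dynamic_markers := honeypot_files.values.map (fun path => path)
  let all_markers := pvStaticMarkers ++ dynamic_markers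
  accesses.foldl (fun hit_list accessed =>
    if pvScanA all_markers accessed then hit_list ++ [accessed] else hit_list) []

-- ===== PORT B =====
def find_honeypot_hits_py_alt (accesses : List String) (honeypot_meta : List (String × List (String × String))) : List String :=
  let honeypot_files : PySem.Dict String String :=
    PySem.Dict.mk (PySem.Dict.getD (PySem.Dict.mk honeypot_meta) "files" [])
  let markers := pvStaticMarkers ++ honeypot_files.values.map (fun path => path)
  let hitIdx : PySem.Set Int :=
    markers.foldl (fun s marker =>
      (PySem.List.enumerate accesses).foldl (fun s p =>
        if PySem.Str.isIn marker p.2 then PySem.Set.add s p.1 else s) s) PySem.Set.empty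
  (PySem.List.enumerate accesses).foldl (fun out p =>
    if PySem.Set.contains hitIdx p.1 then out ++ [p.2] else out) []

-- ===== PRECONDITION & SPEC =====
def Spec_find_honeypot_hits_py (accesses : List String) (honeypot_meta : List (String × List (String × String))) (out : List String) : Prop := out = find_honeypot_hits_py_alt accesses honeypot_meta
instance (accesses : List String) (honeypot_meta : List (String × List (String × String))) (out : List String) : Decidable (Spec_find_honeypot_hits_py accesses honeypot_meta out) := by unfold Spec_find_honeypot_hits_py; infer_instance

-- ===== CLAIM (what is proved, stated in full; the proofs are below) =====
def Claim_equal_find_honeypot_hits_py : Prop := ∀ (accesses : List String) (honeypot_meta : List (String × List (String × String))), Dom_find_honeypot_hits_py accesses honeypot_meta → Spec_find_honeypot_hits_py accesses honeypot_meta (find_honeypot_hits_py accesses honeypot_meta)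

-- ===== LEMMAS AND PROOFS =====

theorem pvScanA_eq_any (markers : List String) (a : String) :
    pvScanA markers a = markers.any (fun m => PySem.Str.isIn m a) := by
  induction markers with
  | nil => rfl
  | cons m rest ih =>
    cases hc : PySem.Str.isIn m a <;> simp [pvScanA, ih]

theorem mem_inner_fold (c : Int × String → Bool) (E : List (Int × String))
    (s : PySem.Set Int) (x : Int) :
    (x ∈ E.foldl (fun s p => if c p then PySem.Set.add s p.1 else s) s) ↔
      (x ∈ s ∨ ∃ p ∈ E, c p = true ∧ x = p.1) := by
  induction E generalizing s with
  | nil => simp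
  | cons p E ih =>
    simp only [List.foldl_cons]
    rw [ih]
    by_cases h : c p = true
    · rw [if_pos h, PySem.Set.mem_add]
      constructor
      · rintro ((hs | hx) | ⟨q, hq, hc, hx⟩)
        · exact Or.inl hs
        · exact Or.inr ⟨p, List.mem_cons_self, h, hx⟩
        · exact Or.inr ⟨q, List.mem_cons_of_mem _ hq, hc, hx⟩
      · rintro (hs | ⟨q, hq, hc, hx⟩)
        · exact Or.inl (Or.inl hs)
        · rcases List.mem_cons.mp hq with rfl | hq'
          · exact Or.inl (Or.inr hx)
          · exact Or.inr ⟨q, hq', hc, hx⟩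
    · rw [if_neg h]
      constructor
      · rintro (hs | ⟨q, hq, hc, hx⟩)
        · exact Or.inl hs
        · exact Or.inr ⟨q, List.mem_cons_of_mem _ hq, hc, hx⟩
      · rintro (hs | ⟨q, hq, hc, hx⟩)
        · exact Or.inl hs
        · rcases List.mem_cons.mp hq with rfl | hq'
          · exact absurd hc h
          · exact Or.inr ⟨q, hq', hc, hx⟩

theorem mem_hit_fold (c : String → Int × String → Bool) (ms : List String)
    (E : List (Int × String)) (s : PySem.Set Int) (x : Int) :
    (x ∈ ms.foldl (fun s marker =>
        E.foldl (fun s p => if c marker p then PySem.Set.add s p.1 else s) s) s) ↔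
      (x ∈ s ∨ ∃ m ∈ ms, ∃ p ∈ E, c m p = true ∧ x = p.1) := by
  induction ms generalizing s with
  | nil => simp
  | cons m ms ih =>
    simp only [List.foldl_cons]
    rw [ih, mem_inner_fold]
    constructor
    · rintro ((hs | ⟨p, hp, hin, hx⟩) | ⟨m', hm', p, hp, hin, hx⟩)
      · exact Or.inl hs
      · exact Or.inr ⟨m, List.mem_cons_self, p, hp, hin, hx⟩
      · exact Or.inr ⟨m', List.mem_cons_of_mem _ hm', p, hp, hin, hx⟩
    · rintro (hs | ⟨m', hm', p, hp, hin, hx⟩)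
      · exact Or.inl (Or.inl hs)
      · rcases List.mem_cons.mp hm' with rfl | h
        · exact Or.inl (Or.inr ⟨p, hp, hin, hx⟩)
        · exact Or.inr ⟨m', h, p, hp, hin, hx⟩

theorem foldl_enum_eq_foldl (xs : List String) (s : Int)
    (q : Int → String → Bool) (pred : String → Bool)
    (h : ∀ p ∈ PySem.List.enumerate xs s, q p.1 p.2 = pred p.2) (out : List String) :
    (PySem.List.enumerate xs s).foldl
        (fun o p => if q p.1 p.2 then o ++ [p.2] else o) out
      = xs.foldl (fun o a => if pred a then o ++ [a] else o) out := by
  induction xs generalizing s out with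
  | nil => simp [PySem.List.enumerate_nil]
  | cons a xs ih =>
    rw [PySem.List.enumerate_cons]
    simp only [List.foldl_cons]
    have hq : q s a = pred a := h (s, a) (by rw [PySem.List.enumerate_cons]; simp)
    rw [hq]
    exact ih (s + 1)
      (fun p hp => h p (by rw [PySem.List.enumerate_cons]; exact List.mem_cons_of_mem _ hp)) _

-- the collected index set agrees with the marker-any predicate on every enumerated pair
theorem contains_hit_eq (accesses : List String) (ms : List String)
    (p : Int × String) (hp : p ∈ PySem.List.enumerate accesses 0) :
    PySem.Set.contains
        (ms.foldl (fun s marker =>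
          (PySem.List.enumerate accesses).foldl
            (fun s q => if PySem.Str.isIn marker q.2 then PySem.Set.add s q.1 else s) s)
          PySem.Set.empty) p.1
      = ms.any (fun m => PySem.Str.isIn m p.2) := by
  rcases (PySem.List.mem_enumerate_iff accesses 0 p).mp hp with ⟨k, hk, hpk⟩
  rw [Bool.eq_iff_iff, PySem.Set.contains_iff,
    mem_hit_fold (fun m q => PySem.Str.isIn m q.2), List.any_eq_true]
  constructor
  · rintro (hs | ⟨m, hm, q, hq, hin, hx⟩)
    · simp [PySem.Set.empty] at hs
    · rcases (PySem.List.mem_enumerate_iff accesses 0 q).mp hq with ⟨k', hk', hqk⟩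
      have hkk : k = k' := by
        have hx' := hx
        rw [hpk, hqk] at hx'
        simpa using hx'
      refine ⟨m, hm, ?_⟩
      rw [hpk]
      subst hkk
      rw [hqk] at hin
      simpa using hin
  · rintro ⟨m, hm, hin⟩
    exact Or.inr ⟨m, hm, p, hp, hin, rfl⟩

-- ===== VERDICT (by name: the statement is the Claim_ definition above) =====
theorem find_honeypot_hits_py_spec : Claim_equal_find_honeypot_hits_py := by
  intro accesses honeypot_meta _
  unfold Spec_find_honeypot_hits_py
  simp only [find_honeypot_hits_py, find_honeypot_hits_py_alt]
  refine Eq.trans ?_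
    (foldl_enum_eq_foldl accesses 0
      (fun i _ =>
        PySem.Set.contains
          ((pvStaticMarkers ++
              (PySem.Dict.mk
                (PySem.Dict.getD (PySem.Dict.mk honeypot_meta) "files" [])).values.map
                (fun path => path)).foldl
            (fun s marker =>
              (PySem.List.enumerate accesses).foldl
                (fun s q => if PySem.Str.isIn marker q.2 then PySem.Set.add s q.1 else s) s)
            PySem.Set.empty) i)
      (fun a =>
        (pvStaticMarkers ++
          (PySem.Dict.mk
            (PySem.Dict.getD (PySem.Dict.mk honeypot_meta) "files" [])).values.map
            (fun path => path)).any (fun m => PySem.Str.isIn m a))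
      (fun p hp => contains_hit_eq accesses _ p hp) []).symm
  simp only [pvScanA_eq_any]
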